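-- pv_equiv track=rewrite | github.com/dfetch-org/dfetch | doc/_ext/scenario_directive.py | _end_before
-- ===== SOURCE A (Python) =====
-- from typing import Dict, FrozenSet, List, Tuple
--
-- def _end_before(available: Tuple[Tuple[str, str], ...], title: str) -> str:
--     """Return the :end-before: value for *title*, or '' for the last scenario."""
--     all_titles = tuple(t for _, t in available)
--     try:
--         idx = all_titles.index(title)
--     except ValueError:
--         return ""
--     if idx < len(available) - 1:
--         next_header, next_title = available[idx + 1]
--         return f":end-before: {next_header}: {next_title}"
--     return ""
-- ===== SOURCE B (Python) =====
-- def _end_before(available, title):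
--     """Return the :end-before: value for *title*, or '' for the last scenario."""
--     table = {}
--     nxt = None
--     for header, t in reversed(available):
--         if nxt is not None:
--             table[t] = f":end-before: {nxt[0]}: {nxt[1]}"
--         nxt = (header, t)
--     return table.get(title, "")
-- ===== Notes on version B (the rewrite author's own statement) =====
-- stated objective: alternative
-- what changed: B traverses the list back-to-front once, building a dict that maps each title to its successor's formatted :end-before: string (later writes for earlier positions overwrite, so the first occurrence wins), then answers with a single dict lookup; A builds an all-titles tuple, does a forward .index scan and a boundary check.
import Mathlib
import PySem

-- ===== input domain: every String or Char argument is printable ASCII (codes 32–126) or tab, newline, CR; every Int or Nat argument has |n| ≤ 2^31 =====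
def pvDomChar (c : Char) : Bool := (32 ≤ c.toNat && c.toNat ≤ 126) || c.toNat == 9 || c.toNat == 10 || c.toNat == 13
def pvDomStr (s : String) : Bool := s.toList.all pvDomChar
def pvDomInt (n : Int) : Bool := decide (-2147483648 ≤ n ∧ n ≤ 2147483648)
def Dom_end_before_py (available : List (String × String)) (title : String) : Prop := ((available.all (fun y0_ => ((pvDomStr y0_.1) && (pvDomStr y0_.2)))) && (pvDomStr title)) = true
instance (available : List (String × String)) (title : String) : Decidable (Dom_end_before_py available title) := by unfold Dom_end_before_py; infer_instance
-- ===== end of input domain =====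

-- B builds, in one back-to-front pass, a dict from each title to its successor's formatted
-- string (earlier occurrences overwrite later ones) and answers by a single dict lookup
-- (objective: alternative — an index/lookup structure instead of A's scan-and-bounds-check).


-- ===== PORT A =====
def end_before_py (available : List (String × String)) (title : String) : String :=
  match PySem.List.index? (available.map (fun p => p.2)) title with
  | none => ""
  | some idx =>
    if (idx : Int) < (available.length : Int) - 1 then
      match PySem.List.pyGet? available ((idx : Int) + 1) with
      | some (next_header, next_title) => ":end-before: " ++ next_header ++ ": " ++ next_title
      | none => ""   -- unreachable: idx + 1 is in range
    else ""

-- ===== PORT B =====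
-- loop body of Source B: state = (table, nxt); on item p, if nxt is set map p's title to
-- nxt's formatted string (dict overwrite), then nxt := p
def ebStep (st : PySem.Dict String String × Option (String × String))
    (p : String × String) : PySem.Dict String String × Option (String × String) :=
  let table := match st.2 with
    | some nx => st.1.insert p.2 (":end-before: " ++ nx.1 ++ ": " ++ nx.2)
    | none => st.1
  (table, some p)

def end_before_py_alt (available : List (String × String)) (title : String) : String :=
  ((available.reverse.foldl ebStep (PySem.Dict.empty, none)).1).getD title ""

-- ===== PRECONDITION & SPEC =====
def Spec_end_before_py (available : List (String × String)) (title : String) (out : String) : Prop := out = end_before_py_alt available title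
instance (available : List (String × String)) (title : String) (out : String) : Decidable (Spec_end_before_py available title out) := by unfold Spec_end_before_py; infer_instance

-- ===== CLAIM (what is proved, stated in full; the proofs are below) =====
def Claim_equal_end_before_py : Prop := ∀ (available : List (String × String)) (title : String), Dom_end_before_py available title → Spec_end_before_py available title (end_before_py available title)

-- ===== LEMMAS AND PROOFS =====

-- forward first-match scan, the common characterisation both ports are reduced to
def fwdScan (available : List (String × String)) (title : String) : String :=
  match available with
  | (_, t) :: next :: rest =>
    if t = title then ":end-before: " ++ next.1 ++ ": " ++ next.2
    else fwdScan (next :: rest) title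
  | _ => ""

-- A's cons step when the head title does not match: same result as on the tail.
lemma end_before_cons_ne (h : String × String) (rest : List (String × String)) (title : String)
    (hne : h.2 ≠ title) :
    end_before_py (h :: rest) title = end_before_py rest title := by
  unfold end_before_py
  rw [List.map_cons, PySem.List.index?_cons_of_ne _ hne]
  cases hk : PySem.List.index? (rest.map (fun p => p.2)) title with
  | none => simp
  | some k =>
    simp only [Option.map_some]
    have h1 : ((k + 1 : Nat) : Int) = (k : Int) + 1 := by push_cast; ring
    simp only [h1]
    by_cases hlt : ((k:Int) + 1) < ((h :: rest).length : Int) - 1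
    · have hlt' : (k : Int) < (rest.length : Int) - 1 := by simp at hlt ⊢; omega
      rw [if_pos hlt, if_pos hlt']
      have : ((k:Int) + 1 + 1) = (((k + 2 : Nat)) : Int) := by push_cast; ring
      rw [this]
      have : ((k:Int) + 1) = (((k + 1 : Nat)) : Int) := by push_cast; ring
      rw [this]
      rw [PySem.List.pyGet?_natCast, PySem.List.pyGet?_natCast]
      rfl
    · have hlt' : ¬ ((k : Int) < (rest.length : Int) - 1) := by simp at hlt ⊢; omega
      rw [if_neg hlt, if_neg hlt']

-- A equals the forward first-match scan.
lemma a_eq_fwd (available : List (String × String)) (title : String) :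
    end_before_py available title = fwdScan available title := by
  induction available with
  | nil => rfl
  | cons h rest ih =>
    by_cases ht : h.2 = title
    · unfold end_before_py fwdScan
      rw [List.map_cons, ht, PySem.List.index?_cons_self]
      cases rest with
      | nil => simp
      | cons next rest' =>
        have hlt : ((0:Nat) : Int) < ((h :: next :: rest').length : Int) - 1 := by simp
        simp only [if_pos hlt]
        have : ((0:Nat) : Int) + 1 = ((1:Nat) : Int) := by norm_num
        rw [this, PySem.List.pyGet?_natCast]
        simp [ht]
    · rw [end_before_cons_ne h rest title ht, ih]
      obtain ⟨hh, th⟩ := h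
      cases rest with
      | nil => rfl
      | cons next rest' =>
        simp only [fwdScan]
        rw [if_neg ht]

-- the backward fold, named for the induction
def ebFold (available : List (String × String)) :
    PySem.Dict String String × Option (String × String) :=
  available.reverse.foldl ebStep (PySem.Dict.empty, none)

lemma ebFold_cons (h : String × String) (rest : List (String × String)) :
    ebFold (h :: rest) = ebStep (ebFold rest) h := by
  unfold ebFold
  rw [List.reverse_cons, List.foldl_append]
  rfl

-- the carried 'nxt' after the fold is the head of the processed list
lemma ebFold_snd (available : List (String × String)) :
    (ebFold available).2 = available.head? := by
  cases available with
  | nil => rfl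
  | cons h rest => rw [ebFold_cons]; rfl

-- B's lookup equals the forward first-match scan.
lemma b_eq_fwd (available : List (String × String)) (title : String) :
    end_before_py_alt available title = fwdScan available title := by
  have key : ∀ xs t, (ebFold xs).1.getD t "" = fwdScan xs t := by
    intro xs
    induction xs with
    | nil => intro t; rfl
    | cons h rest ih =>
      intro t
      rw [ebFold_cons]
      cases rest with
      | nil =>
        simp only [ebStep, ebFold, List.reverse_nil, List.foldl_nil]
        obtain ⟨hh, th⟩ := h
        rfl
      | cons nx rest' =>
        have hsnd : (ebFold (nx :: rest')).2 = some nx := by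
          rw [ebFold_snd]; rfl
        simp only [ebStep, hsnd]
        obtain ⟨hh, th⟩ := h
        simp only [fwdScan]
        rw [PySem.Dict.getD_insert]
        by_cases ht : th = t
        · rw [if_pos ht.symm, if_pos ht]
        · rw [if_neg (fun hc => ht hc.symm), if_neg ht, ih t]
  show (ebFold available).1.getD title "" = fwdScan available title
  exact key available title

-- ===== VERDICT (by name: the statement is the Claim_ definition above) =====
theorem end_before_py_spec : Claim_equal_end_before_py := by
  intro available title _
  show end_before_py available title = end_before_py_alt available title
  rw [a_eq_fwd, b_eq_fwd]
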